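-- pv_equiv track=rewrite | github.com/cnone616/Glowxel | esp32-firmware/scripts/build_adventure_island_pixels.py | segment_occupancy_ranges
-- ===== SOURCE A (Python) =====
-- def segment_occupancy_ranges(occupancy, max_gap: int, min_length: int):
--     ranges = []
--     start = None
--     gap_count = 0
--
--     for index, value in enumerate(occupancy):
--         if value > 0:
--             if start is None:
--                 start = index
--             gap_count = 0
--             continue
--
--         if start is None:
--             continue
--
--         gap_count += 1
--         if gap_count <= max_gap:
--             continue
--
--         end = index - gap_count
--         if end - start + 1 >= min_length:
--             ranges.append((start, end))
--         start = None
--         gap_count = 0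
--
--     if start is not None:
--         end = len(occupancy) - 1 - gap_count
--         if end - start + 1 >= min_length:
--             ranges.append((start, end))
--
--     return ranges
-- ===== SOURCE B (Python) =====
-- def segment_occupancy_ranges(occupancy, max_gap: int, min_length: int):
--     occ = [i for i, v in enumerate(occupancy) if v > 0]
--     g = max(max_gap, 0)
--     clusters = []
--     if occ:
--         first = last = occ[0]
--         for q in occ[1:]:
--             if q - last <= g + 1:
--                 last = q
--             else:
--                 clusters.append((first, last))
--                 first = last = q
--         clusters.append((first, last))
--     return [(s, e) for (s, e) in clusters if e - s + 1 >= min_length]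
-- ===== Notes on version B (the rewrite author's own statement) =====
-- stated objective: alternative
-- what changed: Replaces A's fused single-pass state machine (open range, gap counter, in-loop and post-loop closing) with a collect-then-group decomposition: first list all occupied indices, then group consecutive ones whose index difference is at most max_gap+1, then filter groups by min_length.
import Mathlib
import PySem

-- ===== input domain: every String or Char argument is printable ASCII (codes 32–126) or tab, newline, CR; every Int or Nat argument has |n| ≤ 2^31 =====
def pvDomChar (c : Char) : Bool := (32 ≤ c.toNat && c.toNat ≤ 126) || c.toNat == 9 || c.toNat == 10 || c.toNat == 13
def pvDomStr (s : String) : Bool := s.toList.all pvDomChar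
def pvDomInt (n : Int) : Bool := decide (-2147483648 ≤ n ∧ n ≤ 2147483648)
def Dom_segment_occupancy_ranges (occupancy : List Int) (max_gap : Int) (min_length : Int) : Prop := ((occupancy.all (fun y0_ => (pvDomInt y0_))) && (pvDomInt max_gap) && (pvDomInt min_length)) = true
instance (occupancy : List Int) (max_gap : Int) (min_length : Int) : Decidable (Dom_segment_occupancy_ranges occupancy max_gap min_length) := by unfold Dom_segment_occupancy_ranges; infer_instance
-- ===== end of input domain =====

-- B replaces A's fused state-machine scan by collect-occupied-indices, group by gap, then filter
-- by length (objective: alternative decomposition; same cost). Return values proved equal everywhere.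

-- ===== PORT A =====
-- the for-loop of A as structural recursion over the same state (ranges, start, gap_count), index carried along
def pvALoop (max_gap min_length : Int) (ranges : List (Int × Int)) (start : Option Int) (gap_count index : Int) : List Int → List (Int × Int) × Option Int × Int
  | [] => (ranges, start, gap_count)
  | value :: rest =>
    if value > 0 then
      pvALoop max_gap min_length ranges (some (match start with | none => index | some s => s)) 0 (index + 1) rest
    else
      match start with
      | none => pvALoop max_gap min_length ranges none gap_count (index + 1) rest
      | some s =>
        let g := gap_count + 1
        if g ≤ max_gap then pvALoop max_gap min_length ranges (some s) g (index + 1) rest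
        else
          let e := index - g
          pvALoop max_gap min_length (if e - s + 1 ≥ min_length then ranges ++ [(s, e)] else ranges) none 0 (index + 1) rest

def segment_occupancy_ranges (occupancy : List Int) (max_gap : Int) (min_length : Int) : List (Int × Int) :=
  let st := pvALoop max_gap min_length [] none 0 0 occupancy
  match st.2.1 with
  | some s =>
    let e := (occupancy.length : Int) - 1 - st.2.2
    if e - s + 1 ≥ min_length then st.1 ++ [(s, e)] else st.1
  | none => st.1

-- ===== PORT B =====
-- the grouping loop of Source B: state (clusters, first, last), iterating over the remaining occupied indices
def pvBLoop (g : Int) (clusters : List (Int × Int)) (first last : Int) : List Int → List (Int × Int)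
  | [] => clusters ++ [(first, last)]
  | q :: qs =>
    if q - last ≤ g + 1 then pvBLoop g clusters first q qs
    else pvBLoop g (clusters ++ [(first, last)]) q q qs

def segment_occupancy_ranges_alt (occupancy : List Int) (max_gap : Int) (min_length : Int) : List (Int × Int) :=
  let occ := ((PySem.List.enumerate occupancy).filter (fun p => p.2 > 0)).map (fun p => p.1)
  let clusters : List (Int × Int) :=
    match occ with
    | [] => []
    | p :: ps => pvBLoop (max max_gap 0) [] p p ps
  clusters.filter (fun r => r.2 - r.1 + 1 ≥ min_length)

-- ===== PRECONDITION & SPEC =====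
def Spec_segment_occupancy_ranges (occupancy : List Int) (max_gap : Int) (min_length : Int) (out : List (Int × Int)) : Prop := out = segment_occupancy_ranges_alt occupancy max_gap min_length
instance (occupancy : List Int) (max_gap : Int) (min_length : Int) (out : List (Int × Int)) : Decidable (Spec_segment_occupancy_ranges occupancy max_gap min_length out) := by unfold Spec_segment_occupancy_ranges; infer_instance

-- ===== CLAIM (what is proved, stated in full; the proofs are below) =====
def Claim_equal_segment_occupancy_ranges : Prop := ∀ (occupancy : List Int) (max_gap : Int) (min_length : Int), Dom_segment_occupancy_ranges occupancy max_gap min_length → Spec_segment_occupancy_ranges occupancy max_gap min_length (segment_occupancy_ranges occupancy max_gap min_length)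

-- ===== LEMMAS AND PROOFS =====

-- indices (starting at i) of the positive entries
def pvOccFrom (i : Int) : List Int → List Int
  | [] => []
  | v :: vs => if v > 0 then i :: pvOccFrom (i + 1) vs else pvOccFrom (i + 1) vs

theorem pvOccFrom_enumerate : ∀ (vs : List Int) (i : Int),
    ((PySem.List.enumerate vs i).filter (fun p => p.2 > 0)).map (fun p => p.1) = pvOccFrom i vs := by
  intro vs
  induction vs with
  | nil => intro i; simp [PySem.List.enumerate_nil, pvOccFrom]
  | cons v vs ih =>
    intro i
    simp only [PySem.List.enumerate_cons, List.filter_cons, pvOccFrom]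
    by_cases h : v > 0 <;> simp [h, ih]

theorem pvOccFrom_ge : ∀ (vs : List Int) (i q : Int), q ∈ pvOccFrom i vs → i ≤ q := by
  intro vs
  induction vs with
  | nil => intro i q h; simp [pvOccFrom] at h
  | cons v vs ih =>
    intro i q h
    simp only [pvOccFrom] at h
    split_ifs at h with hv
    · rcases List.mem_cons.mp h with h | h
      · omega
      · have := ih (i + 1) q h; omega
    · have := ih (i + 1) q h; omega

-- grouping without the accumulator
def pvGrp (g first last : Int) : List Int → List (Int × Int)
  | [] => [(first, last)]
  | q :: qs => if q - last ≤ g + 1 then pvGrp g first q qs else (first, last) :: pvGrp g q q qs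

theorem pvBLoop_eq_grp (g : Int) : ∀ (qs : List Int) (acc : List (Int × Int)) (f l : Int),
    pvBLoop g acc f l qs = acc ++ pvGrp g f l qs := by
  intro qs
  induction qs with
  | nil => intro acc f l; simp [pvBLoop, pvGrp]
  | cons q qs ih =>
    intro acc f l
    simp only [pvBLoop, pvGrp]
    split_ifs with h
    · exact ih acc f q
    · rw [ih (acc ++ [(f, l)]) q q]; simp

-- A's post-loop block
def pvFin (min_length n : Int) (st : List (Int × Int) × Option Int × Int) : List (Int × Int) :=
  match st.2.1 with
  | some s =>
    let e := n - 1 - st.2.2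
    if e - s + 1 ≥ min_length then st.1 ++ [(s, e)] else st.1
  | none => st.1

-- what B builds from a given A-loop state
def pvAsm (g : Int) (start : Option Int) (gap i : Int) (occs : List Int) : List (Int × Int) :=
  match start with
  | none => match occs with
            | [] => []
            | p :: ps => pvGrp g p p ps
  | some s => pvGrp g s (i - 1 - gap) occs

theorem pvMain (mg ml : Int) : ∀ (vs : List Int) (i : Int) (acc : List (Int × Int)) (st : Option Int) (gap : Int),
    (st = none → gap = 0) → (∀ s, st = some s → 0 ≤ gap ∧ gap ≤ max mg 0) →
    pvFin ml (i + (vs.length : Int)) (pvALoop mg ml acc st gap i vs)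
      = acc ++ (pvAsm (max mg 0) st gap i (pvOccFrom i vs)).filter (fun r => r.2 - r.1 + 1 ≥ ml) := by
  intro vs
  induction vs with
  | nil =>
    intro i acc st gap hn hs
    cases st with
    | none => simp [pvALoop, pvFin, pvAsm, pvOccFrom]
    | some s =>
      simp only [pvALoop, pvFin, pvAsm, pvOccFrom, pvGrp, List.length_nil, Nat.cast_zero,
        add_zero, List.filter_cons, List.filter_nil, decide_eq_true_eq, ge_iff_le]
      split_ifs <;> simp_all
  | cons v vs ih =>
    intro i acc st gap hn hs
    have hlen : i + ((v :: vs).length : Int) = (i + 1) + (vs.length : Int) := by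
      simp [List.length_cons]; omega
    rw [hlen]
    simp only [pvALoop, pvOccFrom]
    by_cases hv : v > 0
    · simp only [if_pos hv]
      cases st with
      | none =>
        rw [ih (i + 1) acc (some i) 0 (by simp) (by intro s h; exact ⟨le_refl 0, le_max_right mg 0⟩)]
        simp [pvAsm]
      | some s =>
        rw [ih (i + 1) acc (some s) 0 (by simp) (by intro s' h; exact ⟨le_refl 0, le_max_right mg 0⟩)]
        have hg := hs s rfl
        simp only [pvAsm, pvGrp]
        have hc : i - (i - 1 - gap) ≤ max mg 0 + 1 := by linarith [hg.2]
        rw [if_pos hc, show i + 1 - 1 - 0 = i from by ring]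
    · simp only [if_neg hv]
      cases st with
      | none =>
        rw [ih (i + 1) acc none gap hn (by intro s h; simp at h)]
        simp [pvAsm]
      | some s =>
        have hg := hs s rfl
        by_cases hle : gap + 1 ≤ mg
        · simp only [if_pos hle]
          rw [ih (i + 1) acc (some s) (gap + 1) (by simp)
            (by intro s' h; exact ⟨by linarith [hg.1], le_trans hle (le_max_left mg 0)⟩)]
          simp only [pvAsm]
          rw [show i + 1 - 1 - (gap + 1) = i - 1 - gap from by ring]
        · simp only [if_neg hle]
          rw [ih (i + 1) _ none 0 (fun _ => rfl) (by intro s' h; simp at h)]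
          have hacc : (if i - (gap + 1) - s + 1 ≥ ml then acc ++ [(s, i - (gap + 1))] else acc)
              = acc ++ (if i - (gap + 1) - s + 1 ≥ ml then [(s, i - (gap + 1))] else []) := by
            split_ifs <;> simp
          rw [hacc, List.append_assoc]
          congr 1
          simp only [pvAsm, if_neg hv]
          have he : i - (gap + 1) = i - 1 - gap := by omega
          rw [he]
          cases hocc : pvOccFrom (i + 1) vs with
          | nil =>
            simp only [pvGrp, List.filter_cons, List.filter_nil, decide_eq_true_eq, ge_iff_le]
            split_ifs <;> simp_all
          | cons p ps =>
            have hp : i + 1 ≤ p := pvOccFrom_ge vs (i + 1) p (by rw [hocc]; exact List.mem_cons_self)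
            have hmx : max mg 0 ≤ gap := max_le (by omega) hg.1
            have hc : ¬ (p - (i - 1 - gap) ≤ max mg 0 + 1) := by omega
            simp only [pvGrp, if_neg hc, List.filter_cons, decide_eq_true_eq, ge_iff_le]
            split_ifs <;> simp_all

-- ===== VERDICT (by name: the statement is the Claim_ definition above) =====
theorem segment_occupancy_ranges_spec : Claim_equal_segment_occupancy_ranges := by
  intro occ mg ml _
  unfold Spec_segment_occupancy_ranges segment_occupancy_ranges segment_occupancy_ranges_alt
  have h := pvMain mg ml occ 0 [] none 0 (fun _ => rfl) (by intro s h; simp at h)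
  rw [pvOccFrom_enumerate]
  have hz : (0 : Int) + (occ.length : Int) = (occ.length : Int) := by omega
  rw [hz] at h
  simp only [pvFin] at h
  rw [h]
  simp only [pvAsm, List.nil_append]
  cases hocc : pvOccFrom 0 occ with
  | nil => simp
  | cons p ps => simp [pvBLoop_eq_grp]
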